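-- pv_equiv track=rewrite | github.com/happy-xlf/0x3f_leetcode | 美团算法题/20240309/删除区间.py | del_sum
-- ===== SOURCE A (Python) =====
-- def del_sum(a, k):
--     a2 = [0] * len(a)
--     a5 = [0] * len(a)
--     for i in range(len(a)):
--         while  a[i]%2 == 0:
--             a[i] = a[i] // 2
--             a2[i] += 1
--         while  a[i]%5 == 0:
--             a[i] = a[i] // 5
--             a5[i] += 1
--     cnt2 = sum(a2)
--     cnt5 = sum(a5)
--     l = 0
--     res = 0
--     for r in range(len(a)):
--         cnt2 = cnt2 - a2[r]
--         cnt5 = cnt5 - a5[r]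
--         while l <= r and min(cnt2, cnt5) < k:
--             cnt2 = cnt2 + a2[l]
--             cnt5 = cnt5 + a5[l]
--             l+=1
--         res+= r-l+1
--     return res
-- ===== SOURCE B (Python) =====
-- def del_sum(a, k):
--     n = len(a)
--     a2 = [0] * n
--     a5 = [0] * n
--     for i in range(n):
--         while a[i] % 2 == 0:
--             a[i] //= 2
--             a2[i] += 1
--         while a[i] % 5 == 0:
--             a[i] //= 5
--             a5[i] += 1
--     P2 = [0] * (n + 1)
--     P5 = [0] * (n + 1)
--     for i in range(n):
--         P2[i + 1] = P2[i] + a2[i]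
--         P5[i + 1] = P5[i] + a5[i]
--     t2 = P2[n] - k
--     t5 = P5[n] - k
--     res = 0
--     for r in range(n):
--         lo, hi = 0, r + 1
--         while lo < hi:
--             mid = (lo + hi) // 2
--             if P2[r + 1] - P2[mid] <= t2 and P5[r + 1] - P5[mid] <= t5:
--                 hi = mid
--             else:
--                 lo = mid + 1
--         res += r + 1 - lo
--     return res
-- ===== Notes on version B (the rewrite author's own statement) =====
-- stated objective: alternative
-- what changed: Replaced A's monotone two-pointer sliding window with prefix-sum arrays and an independent per-right-end binary search for the leftmost deletable cut index.
import Mathlib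
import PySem

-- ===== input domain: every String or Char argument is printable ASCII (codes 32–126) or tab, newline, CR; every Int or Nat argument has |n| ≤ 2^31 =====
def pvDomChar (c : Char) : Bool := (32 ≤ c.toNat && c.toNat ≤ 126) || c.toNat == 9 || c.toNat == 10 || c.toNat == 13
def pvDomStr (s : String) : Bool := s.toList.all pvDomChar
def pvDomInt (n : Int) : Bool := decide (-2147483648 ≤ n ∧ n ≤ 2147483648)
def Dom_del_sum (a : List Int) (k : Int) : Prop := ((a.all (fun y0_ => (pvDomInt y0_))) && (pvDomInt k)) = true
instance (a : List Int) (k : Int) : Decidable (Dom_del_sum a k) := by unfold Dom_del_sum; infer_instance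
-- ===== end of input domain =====

-- B replaces A's monotone two-pointer with prefix sums + per-index binary search (alternative
-- algorithm, not claimed faster). Both A and B mutate the Python list `a` in place identically
-- (dividing out factors 2 and 5); the equivalence proved here is about the return value.

-- ===== PORT A =====
-- factor-stripping while-loop of A: returns (reduced value, count of divisions by d).
-- Guards `x ≠ 0 ∧ 2 ≤ d` only ensure termination (on a 0 entry both Pythons loop forever).
def pvFac (d : Int) (x : Int) : Int × Int :=
  if h : x ≠ 0 ∧ 2 ≤ d ∧ PySem.Int.mod x d = 0 then
    let p := pvFac d (PySem.Int.floordiv x d)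
    (p.1, p.2 + 1)
  else (x, 0)
termination_by x.natAbs
decreasing_by
  have hd : (0:Int) < d := by omega
  have hdvd : d ∣ x := (PySem.Int.mod_eq_zero_iff_dvd x d).mp h.2.2
  rw [PySem.Int.floordiv_eq_ediv_of_pos hd]
  rcases hdvd with ⟨c, rfl⟩
  rw [Int.mul_ediv_cancel_left _ (by omega)]
  have hc : c ≠ 0 := by rintro rfl; exact h.1 (by ring)
  rw [Int.natAbs_mul]
  have h1 : 2 ≤ d.natAbs := by omega
  have h2 : 1 ≤ c.natAbs := by omega
  nlinarith

-- A's inner while: pops elements at l while the remaining factor counts are below k.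
def pvShrink (a2 a5 : List Int) (k : Int) (r : Nat) (cnt2 cnt5 l : Int) : Int × Int × Int :=
  if h : l ≤ (r:Int) ∧ min cnt2 cnt5 < k then
    pvShrink a2 a5 k r (cnt2 + PySem.List.pyGetD a2 l 0) (cnt5 + PySem.List.pyGetD a5 l 0) (l + 1)
  else (cnt2, cnt5, l)
termination_by ((r:Int) + 1 - l).toNat
decreasing_by omega

def del_sum (a : List Int) (k : Int) : Int :=
  let a2 := a.map (fun x => (pvFac 2 x).2)
  let a5 := a.map (fun x => (pvFac 5 (pvFac 2 x).1).2)
  let st := (List.range a.length).foldl (fun (st : Int × Int × Int × Int) r =>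
    let c2 := st.1 - a2.getD r 0
    let c5 := st.2.1 - a5.getD r 0
    let s := pvShrink a2 a5 k r c2 c5 st.2.2.1
    (s.1, s.2.1, s.2.2, st.2.2.2 + ((r : Int) - s.2.2 + 1))) (a2.sum, a5.sum, 0, 0)
  st.2.2.2

-- ===== PORT B =====
-- binary search for the leftmost cut index in [lo, hi) whose window sums are within budget
def pvSearch (P2 P5 : List Int) (s2 s5 t2 t5 lo hi : Int) : Int :=
  if h : lo < hi then
    if s2 - PySem.List.pyGetD P2 (PySem.Int.floordiv (lo + hi) 2) 0 ≤ t2 ∧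
       s5 - PySem.List.pyGetD P5 (PySem.Int.floordiv (lo + hi) 2) 0 ≤ t5 then
      pvSearch P2 P5 s2 s5 t2 t5 lo (PySem.Int.floordiv (lo + hi) 2)
    else
      pvSearch P2 P5 s2 s5 t2 t5 (PySem.Int.floordiv (lo + hi) 2 + 1) hi
  else lo
termination_by (hi - lo).toNat
decreasing_by
  · have h2 : PySem.Int.floordiv (lo + hi) 2 < hi := by
      rw [PySem.Int.floordiv_lt_iff_lt_mul (by omega)]; omega
    omega
  · have hb := PySem.Int.floordiv_two_mid_bounds (le_of_lt h)
    omega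

def del_sum_alt (a : List Int) (k : Int) : Int :=
  let a2 := a.map (fun x => (pvFac 2 x).2)
  let a5 := a.map (fun x => (pvFac 5 (pvFac 2 x).1).2)
  let P2 := List.scanl (· + ·) 0 a2
  let P5 := List.scanl (· + ·) 0 a5
  let t2 := P2.getD a.length 0 - k
  let t5 := P5.getD a.length 0 - k
  (List.range a.length).foldl (fun res r =>
    let lo := pvSearch P2 P5 (P2.getD (r+1) 0) (P5.getD (r+1) 0) t2 t5 0 ((r:Int)+1)
    res + ((r : Int) + 1 - lo)) 0

-- ===== PRECONDITION & SPEC =====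
def Spec_del_sum (a : List Int) (k : Int) (out : Int) : Prop := out = del_sum_alt a k
instance (a : List Int) (k : Int) (out : Int) : Decidable (Spec_del_sum a k out) := by unfold Spec_del_sum; infer_instance

-- ===== CLAIM (what is proved, stated in full; the proofs are below) =====
def Claim_equal_del_sum : Prop := ∀ (a : List Int) (k : Int), Dom_del_sum a k → Spec_del_sum a k (del_sum a k)

-- ===== LEMMAS AND PROOFS =====

def pvS (xs : List Int) (i : Nat) : Int := (xs.take i).sum

theorem pvS_succ (xs : List Int) (i : Nat) (h : i < xs.length) :
    pvS xs (i+1) = pvS xs i + xs.getD i 0 := by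
  rw [pvS, List.take_succ_eq_append_getElem h, List.sum_append]
  simp [pvS, List.getD_eq_getElem?_getD, List.getElem?_eq_getElem h]

theorem pvS_mono (xs : List Int) (h : ∀ x ∈ xs, 0 ≤ x) {i j : Nat} (hij : i ≤ j) :
    pvS xs i ≤ pvS xs j := by
  have hj : j = i + (j - i) := by omega
  simp only [pvS]
  rw [hj, List.take_add, List.sum_append]
  have : 0 ≤ (((xs.drop i).take (j - i)).sum) := by
    apply List.sum_nonneg
    intro x hx
    exact h x (List.mem_of_mem_drop (List.mem_of_mem_take hx))
  have h2 : (List.take i xs).sum = pvS xs i := rfl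
  omega

theorem pvS_length (xs : List Int) : pvS xs xs.length = xs.sum := by
  simp [pvS]

theorem scanl_getD (xs : List Int) (c : Int) (i : Nat) (h : i ≤ xs.length) :
    (List.scanl (· + ·) c xs).getD i 0 = c + pvS xs i := by
  induction xs generalizing c i with
  | nil => simp at h; simp [h, pvS]
  | cons x xs ih =>
    cases i with
    | zero => simp [pvS]
    | succ i =>
      rw [List.scanl_cons, List.getD_cons_succ, ih (c + x) i (by simpa using h)]
      simp [pvS, add_assoc]

def pvV (a2 a5 : List Int) (k : Int) (r l : Nat) : Bool :=
  decide (pvS a2 (r+1) - pvS a2 l ≤ a2.sum - k ∧ pvS a5 (r+1) - pvS a5 l ≤ a5.sum - k)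

def pvF (a2 a5 : List Int) (k : Int) (r : Nat) : Nat :=
  Nat.find (p := fun l => l = r + 1 ∨ pvV a2 a5 k r l = true) ⟨r + 1, Or.inl rfl⟩

theorem pvV_mono (a2 a5 : List Int) (k : Int) (h2 : ∀ x ∈ a2, 0 ≤ x) (h5 : ∀ x ∈ a5, 0 ≤ x)
    (r : Nat) {l l' : Nat} (hll : l ≤ l') (hv : pvV a2 a5 k r l = true) :
    pvV a2 a5 k r l' = true := by
  simp only [pvV, decide_eq_true_eq] at *
  have m2 := pvS_mono a2 h2 hll
  have m5 := pvS_mono a5 h5 hll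
  omega

theorem pvV_anti (a2 a5 : List Int) (k : Int) (h2 : ∀ x ∈ a2, 0 ≤ x) (h5 : ∀ x ∈ a5, 0 ≤ x)
    (r l : Nat) (hv : pvV a2 a5 k (r+1) l = true) : pvV a2 a5 k r l = true := by
  simp only [pvV, decide_eq_true_eq] at *
  have m2 := pvS_mono a2 h2 (show r+1 ≤ r+1+1 by omega)
  have m5 := pvS_mono a5 h5 (show r+1 ≤ r+1+1 by omega)
  omega

theorem pvF_le (a2 a5 : List Int) (k : Int) (r : Nat) : pvF a2 a5 k r ≤ r + 1 :=
  Nat.find_min' _ (Or.inl rfl)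

theorem pvF_min (a2 a5 : List Int) (k : Int) (r : Nat) {m : Nat} (hm : m < pvF a2 a5 k r) :
    pvV a2 a5 k r m = false := by
  have := Nat.find_min (p := fun l => l = r + 1 ∨ pvV a2 a5 k r l = true) ⟨r + 1, Or.inl rfl⟩ hm
  simp only [not_or] at this
  simpa using this.2

theorem pvF_valid_iff (a2 a5 : List Int) (k : Int) (h2 : ∀ x ∈ a2, 0 ≤ x) (h5 : ∀ x ∈ a5, 0 ≤ x)
    (r : Nat) {m : Nat} (hm : m ≤ r) :
    pvV a2 a5 k r m = true ↔ pvF a2 a5 k r ≤ m := by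
  constructor
  · intro hv; exact Nat.find_min' _ (Or.inr hv)
  · intro hf
    have hs := Nat.find_spec (p := fun l => l = r + 1 ∨ pvV a2 a5 k r l = true) ⟨r + 1, Or.inl rfl⟩
    rcases hs with h | h
    · exfalso; change pvF a2 a5 k r = r + 1 at h; omega
    · exact pvV_mono a2 a5 k h2 h5 r hf h

theorem pvF_mono (a2 a5 : List Int) (k : Int) (h2 : ∀ x ∈ a2, 0 ≤ x) (h5 : ∀ x ∈ a5, 0 ≤ x)
    (r : Nat) : pvF a2 a5 k r ≤ pvF a2 a5 k (r+1) := by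
  have hs := Nat.find_spec (p := fun l => l = r + 2 ∨ pvV a2 a5 k (r+1) l = true) ⟨r + 2, Or.inl rfl⟩
  have hle := pvF_le a2 a5 k r
  rcases hs with h | h
  · change pvF a2 a5 k (r+1) = r + 2 at h; omega
  · have := pvV_anti a2 a5 k h2 h5 r _ h
    exact Nat.find_min' _ (Or.inr this)

theorem shrink_eq (a2 a5 : List Int) (k : Int) (h2 : ∀ x ∈ a2, 0 ≤ x) (h5 : ∀ x ∈ a5, 0 ≤ x)
    (hlen : a5.length = a2.length) (r : Nat) (hr : r < a2.length) (l : Int) (h0 : 0 ≤ l) (hlF : l ≤ (pvF a2 a5 k r : Int)) :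
    pvShrink a2 a5 k r (a2.sum - (pvS a2 (r+1) - pvS a2 l.toNat))
        (a5.sum - (pvS a5 (r+1) - pvS a5 l.toNat)) l
      = (a2.sum - (pvS a2 (r+1) - pvS a2 (pvF a2 a5 k r)),
         a5.sum - (pvS a5 (r+1) - pvS a5 (pvF a2 a5 k r)),
         ((pvF a2 a5 k r : Nat) : Int)) := by
  have hFle := pvF_le a2 a5 k r
  rw [pvShrink]
  by_cases hl : l = (pvF a2 a5 k r : Int)
  · rw [dif_neg]
    · rw [hl]; simp
    · push Not
      intro hlr
      have hFr : pvF a2 a5 k r ≤ r := by omega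
      have hv := (pvF_valid_iff a2 a5 k h2 h5 r hFr).mpr (le_refl _)
      simp only [pvV, decide_eq_true_eq] at hv
      have hlt : l.toNat = pvF a2 a5 k r := by omega
      rw [hlt]
      simp only [min_def]
      split_ifs <;> omega
  · have hlF' : l < (pvF a2 a5 k r : Int) := lt_of_le_of_ne hlF hl
    have hnv := pvF_min a2 a5 k r (show l.toNat < pvF a2 a5 k r by omega)
    simp only [pvV, decide_eq_false_iff_not, not_and, not_le] at hnv
    have hllen : l.toNat < a2.length := by omega
    rw [dif_pos]
    · have hg2 : PySem.List.pyGetD a2 l 0 = a2.getD l.toNat 0 := by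
        rw [PySem.List.pyGetD_eq_getElem a2 0 h0 (by omega),
           List.getD_eq_getElem a2 0 hllen]
      have hllen5 : l.toNat < a5.length := by omega
      have hg5 : PySem.List.pyGetD a5 l 0 = a5.getD l.toNat 0 := by
        rw [PySem.List.pyGetD_eq_getElem a5 0 h0 (by omega),
           List.getD_eq_getElem a5 0 hllen5]
      have ht : (l + 1).toNat = l.toNat + 1 := by omega
      have e2 : a2.sum - (pvS a2 (r+1) - pvS a2 l.toNat) + PySem.List.pyGetD a2 l 0
          = a2.sum - (pvS a2 (r+1) - pvS a2 (l+1).toNat) := by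
        rw [hg2, ht, pvS_succ a2 l.toNat hllen]; ring
      have e5 : a5.sum - (pvS a5 (r+1) - pvS a5 l.toNat) + PySem.List.pyGetD a5 l 0
          = a5.sum - (pvS a5 (r+1) - pvS a5 (l+1).toNat) := by
        rw [hg5, ht, pvS_succ a5 l.toNat hllen5]; ring
      rw [e2, e5]
      exact shrink_eq a2 a5 k h2 h5 hlen r hr (l+1) (by omega) (by omega)
    · constructor
      · omega
      · rcases lt_or_ge (pvS a2 (r+1) - pvS a2 l.toNat) (a2.sum - k + 1) with hc | hc
        · have := hnv (by omega)
          simp only [min_def]; split_ifs <;> omega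
        · simp only [min_def]; split_ifs <;> omega

theorem scanl_pyGetD (xs : List Int) (i : Int) (h0 : 0 ≤ i) (h1 : i ≤ (xs.length : Int)) :
    PySem.List.pyGetD (List.scanl (· + ·) 0 xs) i 0 = pvS xs i.toNat := by
  have hlt : i.toNat < (List.scanl (· + ·) 0 xs).length := by
    rw [List.length_scanl]; omega
  rw [PySem.List.pyGetD_eq_getElem _ 0 h0 (by rw [List.length_scanl]; omega),
     ← List.getD_eq_getElem _ 0 hlt, scanl_getD xs 0 i.toNat (by omega)]
  ring

theorem search_eq (a2 a5 : List Int) (k : Int) (h2 : ∀ x ∈ a2, 0 ≤ x) (h5 : ∀ x ∈ a5, 0 ≤ x)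
    (hlen : a5.length = a2.length) (r : Nat) (hr : r < a2.length) (lo hi : Int) (hlo : 0 ≤ lo)
    (h1 : lo ≤ (pvF a2 a5 k r : Int)) (h3 : (pvF a2 a5 k r : Int) ≤ hi) (h4 : hi ≤ (r:Int) + 1) :
    pvSearch (List.scanl (· + ·) 0 a2) (List.scanl (· + ·) 0 a5)
      (pvS a2 (r+1)) (pvS a5 (r+1)) (a2.sum - k) (a5.sum - k) lo hi = (pvF a2 a5 k r : Int) := by
  rw [pvSearch]
  by_cases hlh : lo < hi
  · rw [dif_pos hlh]
    have hb := PySem.Int.floordiv_two_mid_bounds (le_of_lt hlh)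
    have hmlt : PySem.Int.floordiv (lo + hi) 2 < hi := by
      rw [PySem.Int.floordiv_lt_iff_lt_mul (by omega)]; omega
    set mid := PySem.Int.floordiv (lo + hi) 2 with hmid
    have hmr : mid.toNat ≤ r := by omega
    have hg2 : PySem.List.pyGetD (List.scanl (· + ·) 0 a2) mid 0 = pvS a2 mid.toNat :=
      scanl_pyGetD a2 mid (by omega) (by omega)
    have hg5 : PySem.List.pyGetD (List.scanl (· + ·) 0 a5) mid 0 = pvS a5 mid.toNat :=
      scanl_pyGetD a5 mid (by omega) (by omega)
    rw [hg2, hg5]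
    split_ifs with hc
    · have hv : pvV a2 a5 k r mid.toNat = true := by
        simp only [pvV, decide_eq_true_eq]; exact hc
      have hFm := (pvF_valid_iff a2 a5 k h2 h5 r hmr).mp hv
      exact search_eq a2 a5 k h2 h5 hlen r hr lo mid hlo h1 (by omega) (by omega)
    · have hnv : pvV a2 a5 k r mid.toNat = false := by
        simp only [pvV, decide_eq_false_iff_not]; exact hc
      have hFgt : (mid.toNat : Int) < (pvF a2 a5 k r : Int) := by
        by_contra hcon
        have := (pvF_valid_iff a2 a5 k h2 h5 r hmr).mpr (by omega)
        rw [hnv] at this; exact Bool.false_ne_true this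
      exact search_eq a2 a5 k h2 h5 hlen r hr (mid + 1) hi (by omega) (by omega) h3 h4
  · rw [dif_neg hlh]; omega
termination_by (hi - lo).toNat
decreasing_by
  · omega
  · omega

def pvG (a2 a5 : List Int) (k : Int) : Nat → Nat
  | 0 => 0
  | m+1 => pvF a2 a5 k m

theorem pvG_le (a2 a5 : List Int) (k : Int) (h2 : ∀ x ∈ a2, 0 ≤ x) (h5 : ∀ x ∈ a5, 0 ≤ x)
    (m : Nat) : pvG a2 a5 k m ≤ pvF a2 a5 k m := by
  cases m with
  | zero => exact Nat.zero_le _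
  | succ m => exact pvF_mono a2 a5 k h2 h5 m

theorem pvFac_nonneg (d x : Int) : 0 ≤ (pvFac d x).2 := by
  fun_induction pvFac d x with
  | case1 x h p hp => exact add_nonneg hp (by norm_num)
  | case2 x h => exact le_refl 0

theorem A_loop (a2 a5 : List Int) (k : Int) (h2 : ∀ x ∈ a2, 0 ≤ x) (h5 : ∀ x ∈ a5, 0 ≤ x)
    (hlen : a5.length = a2.length) (m : Nat) (hm : m ≤ a2.length) :
    (List.range m).foldl (fun (st : Int × Int × Int × Int) r =>
      let c2 := st.1 - a2.getD r 0
      let c5 := st.2.1 - a5.getD r 0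
      let s := pvShrink a2 a5 k r c2 c5 st.2.2.1
      (s.1, s.2.1, s.2.2, st.2.2.2 + ((r : Int) - s.2.2 + 1))) (a2.sum, a5.sum, 0, 0)
    = (a2.sum - (pvS a2 m - pvS a2 (pvG a2 a5 k m)),
       a5.sum - (pvS a5 m - pvS a5 (pvG a2 a5 k m)),
       ((pvG a2 a5 k m : Nat) : Int),
       (List.range m).foldl (fun (res : Int) (r : Nat) => res + ((r:Int) + 1 - (pvF a2 a5 k r : Int))) 0) := by
  induction m with
  | zero => simp [pvG, pvS]
  | succ m ih =>
    rw [List.range_succ, List.foldl_append, List.foldl_append, ih (by omega)]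
    simp only [List.foldl_cons, List.foldl_nil]
    have hGle := pvG_le a2 a5 k h2 h5 m
    have hFle := pvF_le a2 a5 k m
    have hc2 : a2.sum - (pvS a2 m - pvS a2 (pvG a2 a5 k m)) - a2.getD m 0
        = a2.sum - (pvS a2 (m+1) - pvS a2 (pvG a2 a5 k m)) := by
      rw [pvS_succ a2 m (by omega)]; ring
    have hc5 : a5.sum - (pvS a5 m - pvS a5 (pvG a2 a5 k m)) - a5.getD m 0
        = a5.sum - (pvS a5 (m+1) - pvS a5 (pvG a2 a5 k m)) := by
      rw [pvS_succ a5 m (by omega)]; ring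
    have hs := shrink_eq a2 a5 k h2 h5 hlen m (by omega) ((pvG a2 a5 k m : Nat) : Int)
      (by positivity) (by exact_mod_cast hGle)
    simp only [Int.toNat_natCast] at hs
    simp only [hc2, hc5, hs]
    have hG1 : pvG a2 a5 k (m+1) = pvF a2 a5 k m := rfl
    simp only [hG1]
    refine Prod.ext rfl (Prod.ext rfl (Prod.ext rfl ?_))
    simp only []
    ring

theorem main_eq (a : List Int) (k : Int) : del_sum a k = del_sum_alt a k := by
  unfold del_sum del_sum_alt
  dsimp only
  set a2 := a.map (fun x => (pvFac 2 x).2) with ha2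
  set a5 := a.map (fun x => (pvFac 5 (pvFac 2 x).1).2) with ha5
  have h2 : ∀ x ∈ a2, 0 ≤ x := by
    intro x hx; rw [ha2] at hx
    obtain ⟨y, _, rfl⟩ := List.mem_map.mp hx
    exact pvFac_nonneg 2 y
  have h5 : ∀ x ∈ a5, 0 ≤ x := by
    intro x hx; rw [ha5] at hx
    obtain ⟨y, _, rfl⟩ := List.mem_map.mp hx
    exact pvFac_nonneg 5 _
  have hlen2 : a2.length = a.length := by rw [ha2]; simp
  have hlen : a5.length = a2.length := by rw [ha2, ha5]; simp
  have hA := A_loop a2 a5 k h2 h5 hlen a.length (by omega)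
  dsimp only at hA
  rw [← hlen2] at hA
  rw [← hlen2]
  rw [hA]
  have hT2 : (List.scanl (· + ·) 0 a2).getD a2.length 0 - k = a2.sum - k := by
    rw [scanl_getD a2 0 a2.length (le_refl _), pvS_length]; ring
  have hT5 : (List.scanl (· + ·) 0 a5).getD a2.length 0 - k = a5.sum - k := by
    rw [← hlen, scanl_getD a5 0 a5.length (le_refl _), pvS_length]; ring
  simp only [hT2, hT5]
  have hfold : (List.range a2.length).foldl (fun (res : Int) (r : Nat) =>
      res + ((r:Int) + 1 - pvSearch (List.scanl (· + ·) 0 a2) (List.scanl (· + ·) 0 a5)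
        ((List.scanl (· + ·) 0 a2).getD (r+1) 0) ((List.scanl (· + ·) 0 a5).getD (r+1) 0)
        (a2.sum - k) (a5.sum - k) 0 ((r:Int)+1))) 0
      = (List.range a2.length).foldl
          (fun (res : Int) (r : Nat) => res + ((r:Int) + 1 - (pvF a2 a5 k r : Int))) 0 := by
    apply List.foldl_ext
    intro acc r hr
    have hrn : r < a2.length := List.mem_range.mp hr
    have hs2 : (List.scanl (· + ·) 0 a2).getD (r+1) 0 = pvS a2 (r+1) := by
      rw [scanl_getD a2 0 (r+1) (by omega)]; ring
    have hs5 : (List.scanl (· + ·) 0 a5).getD (r+1) 0 = pvS a5 (r+1) := by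
      rw [scanl_getD a5 0 (r+1) (by omega)]; ring
    rw [hs2, hs5, search_eq a2 a5 k h2 h5 hlen r hrn 0 ((r:Int)+1) (le_refl _)
      (by positivity) (by exact_mod_cast pvF_le a2 a5 k r) (le_refl _)]
  rw [hfold]


-- ===== VERDICT (by name: the statement is the Claim_ definition above) =====
theorem del_sum_spec : Claim_equal_del_sum := by
  intro a k _
  unfold Spec_del_sum
  exact main_eq a k
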